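-- pv_equiv track=rewrite | github.com/mxtdluffy/UNSW-CSE-COURSES | COMP9021/Final_sample_questions/sample_3.py | good_subsequences
-- ===== SOURCE A (Python) =====
-- def good_subsequences(word):
--     '''
--     >>> good_subsequences('')
--     ['']
--     >>> good_subsequences('aaa')
--     ['', 'a']
--     >>> good_subsequences('aaabbb')
--     ['', 'a', 'ab', 'b']
--     >>> good_subsequences('aaabbc')
--     ['', 'a', 'ab', 'abc', 'ac', 'b', 'bc', 'c']
--     >>> good_subsequences('aaabbaaa')
--     ['', 'a', 'ab', 'b', 'ba']
--     >>> good_subsequences('abbbcaaabccc')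
--     ['', 'a', 'ab', 'abc', 'ac', 'acb', 'b', 'ba', 'bac',\
--  'bc', 'bca', 'c', 'ca', 'cab', 'cb']
--     >>> good_subsequences('abbbcaaabcccaaa')
--     ['', 'a', 'ab', 'abc', 'ac', 'acb', 'b', 'ba', 'bac',\
--  'bc', 'bca', 'c', 'ca', 'cab', 'cb', 'cba']
--     >>> good_subsequences('abbbcaaabcccaaabbbbbccab')
--     ['', 'a', 'ab', 'abc', 'ac', 'acb', 'b', 'ba', 'bac',\
--  'bc', 'bca', 'c', 'ca', 'cab', 'cb', 'cba']
--     '''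
--     # Insert your code here
--     char = ''
--     length = len(word)
--     idx = 0
--     if not length:
--         return ['']
--     if length == 1:
--         return ['', word]
--     while idx < length - 1:
--         cur = word[idx]
--         while idx < length - 1:
--             if word[idx + 1] == cur:
--                 idx += 1
--             else:
--                 break
--         char += cur
--         idx += 1
--     if idx == length - 1:
--         if cur != word[idx]:
--             char += word[idx]
--
--     result = ['']
--     tmp = ''
--     for i in range(len(char)):
--         tmp = char[i]
--         solve(char[i + 1:], result, tmp)
--
--     result = sorted(result)
--     return result
--
-- def solve(char, result, tmp):
--     if tmp not in result:
--         result.append(tmp)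
--     for i in range(len(char)):
--         if char[i] not in tmp:
--             new_tmp = tmp + char[i]
--             solve(char[i + 1:], result, new_tmp)
-- ===== SOURCE B (Python) =====
-- def good_subsequences(word):
--     # collapse consecutive duplicate characters, then enumerate subsequences by bitmask
--     comp = word[:1] + ''.join(b for a, b in zip(word, word[1:]) if a != b)
--     n = len(comp)
--     out = set()
--     for mask in range(1 << n):
--         s = ''.join(comp[i] for i in range(n) if mask >> i & 1)
--         if len(set(s)) == len(s):
--             out.add(s)
--     return sorted(out)
-- ===== Notes on version B (the rewrite author's own statement) =====
-- stated objective: alternative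
-- what changed: Replaces the index-while run-compression plus recursive backtracking search (mutating a dedup-by-membership list) with a zip comprehension for compression and a flat bitmask enumeration of all subsequences of the compressed word, filtered for distinct characters into a set.
import Mathlib
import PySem

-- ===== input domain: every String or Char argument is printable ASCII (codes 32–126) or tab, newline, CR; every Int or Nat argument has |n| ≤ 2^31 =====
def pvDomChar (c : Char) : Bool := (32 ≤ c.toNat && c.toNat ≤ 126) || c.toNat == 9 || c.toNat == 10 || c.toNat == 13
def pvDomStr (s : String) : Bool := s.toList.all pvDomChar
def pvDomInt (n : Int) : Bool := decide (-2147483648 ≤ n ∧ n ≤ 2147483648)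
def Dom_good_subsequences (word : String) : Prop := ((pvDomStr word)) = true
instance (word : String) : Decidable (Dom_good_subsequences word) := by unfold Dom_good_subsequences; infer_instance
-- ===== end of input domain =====

-- B replaces A's index-while run-compression and recursive backtracking (dedup by membership in a
-- mutated list) with a zip-comprehension compression and a flat bitmask enumeration of all
-- subsequences of the compressed word, filtered for distinct characters into a set (alternative).

-- ===== PORT A =====
-- the inner while loop: advances idx past consecutive duplicates of cur
def innerA (w : List Char) (idx : Nat) (cur : Char) : Nat :=
  if _h : idx < w.length - 1 then
    if w.getD (idx + 1) ' ' = cur then innerA w (idx + 1) cur else idx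
  else idx
termination_by w.length - 1 - idx
decreasing_by omega

-- the index never moves backwards (needed by outerA's termination proof)
theorem innerA_ge (w : List Char) (idx : Nat) (cur : Char) : idx ≤ innerA w idx cur := by
  rw [innerA]
  split_ifs with h1 h2
  · exact Nat.le_trans (Nat.le_succ idx) (innerA_ge w (idx + 1) cur)
  · exact Nat.le_refl idx
  · exact Nat.le_refl idx
termination_by w.length - 1 - idx
decreasing_by omega

-- the outer while loop of A's run compression; returns (char, idx, cur)
def outerA (w : List Char) (idx : Nat) (char : List Char) (cur : Char) :
    List Char × Nat × Char :=
  if _h : idx < w.length - 1 then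
    outerA w (innerA w idx (w.getD idx ' ') + 1) (char ++ [w.getD idx ' ']) (w.getD idx ' ')
  else (char, idx, cur)
termination_by w.length - idx
decreasing_by have := innerA_ge w idx (w.getD idx ' '); omega

-- the compression section of A (loop plus the trailing-character fix-up)
def compressA (w : List Char) : List Char :=
  let t := outerA w 0 [] ' '
  if t.2.1 = w.length - 1 then
    if t.2.2 ≠ w.getD t.2.1 ' ' then t.1 ++ [w.getD t.2.1 ' '] else t.1
  else t.1

mutual
-- def solve(char, result, tmp) of A (result is threaded instead of mutated in place)
def solveA (char : List Char) (result : List String) (tmp : List Char) : List String :=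
  solveFor char
    (if String.ofList tmp ∈ result then result else result ++ [String.ofList tmp]) tmp
termination_by (char.length, 1)

-- the 'for i in range(len(char))' loop inside solve
def solveFor (char : List Char) (result : List String) (tmp : List Char) : List String :=
  match char with
  | [] => result
  | c :: rest =>
      solveFor rest (if c ∈ tmp then result else solveA rest result (tmp ++ [c])) tmp
termination_by (char.length, 0)
end

-- the top-level 'for i in range(len(char))' loop of A
def topLoopA (char : List Char) (result : List String) : List String :=
  match char with
  | [] => result
  | c :: rest => topLoopA rest (solveA rest result [c])

def good_subsequences (word : String) : List String :=
  if word.toList.length = 0 then [""]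
  else if word.toList.length = 1 then ["", word]
  else PySem.List.sorted (topLoopA (compressA word.toList) [""]) (fun x => x) false

-- ===== PORT B =====
-- comp = word[:1] + ''.join(b for a, b in zip(word, word[1:]) if a != b)
def fB (p : Char × Char) : Option Char := if p.1 ≠ p.2 then some p.2 else none

def compB (w : List Char) : List Char :=
  w.take 1 ++ (w.zip w.tail).filterMap fB

-- ''.join(comp[i] for i in range(n) if mask >> i & 1)
def selectB (comp : List Char) (mask : Nat) : List Char :=
  (List.range comp.length).filterMap
    (fun i => if (mask >>> i) &&& 1 = 1 then some (comp.getD i ' ') else none)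

-- the 'for mask in range(1 << n)' loop building the set out
-- (range over the nonnegative ints 0 .. 2^n - 1 is ported as List.range on Nat; exact here)
def outB (comp : List Char) : List String :=
  (List.range (1 <<< comp.length)).foldl
    (fun acc mask =>
      let s := selectB comp mask
      if (PySem.Set.ofList s).length = s.length then PySem.Set.add acc (String.ofList s)
      else acc)
    PySem.Set.empty

def good_subsequences_alt (word : String) : List String :=
  PySem.List.sorted (outB (compB word.toList)) (fun x => x) false

-- ===== PRECONDITION & SPEC =====
def Spec_good_subsequences (word : String) (out : List String) : Prop := out = good_subsequences_alt word
instance (word : String) (out : List String) : Decidable (Spec_good_subsequences word out) := by unfold Spec_good_subsequences; infer_instance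

-- ===== CLAIM (what is proved, stated in full; the proofs are below) =====
def Claim_equal_good_subsequences : Prop := ∀ (word : String), Dom_good_subsequences word → Spec_good_subsequences word (good_subsequences word)

-- ===== LEMMAS AND PROOFS =====

-- reference run-compression: collapse consecutive duplicates
def collapse : List Char → List Char
  | [] => []
  | [c] => [c]
  | a :: b :: r => if a = b then collapse (b :: r) else a :: collapse (b :: r)

-- bit-selection of a sublist, recursively over the list
def selRec : List Char → Nat → List Char
  | [], _ => []
  | c :: r, m => (if m &&& 1 = 1 then [c] else []) ++ selRec r (m >>> 1)

theorem drop_getD (w : List Char) (i : Nat) (h : i < w.length) :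
    w.drop i = w.getD i ' ' :: w.drop (i + 1) := by
  rw [List.drop_eq_getElem_cons h, List.getD_eq_getElem w ' ' h]

theorem collapse_cons₂ (a b : Char) (r : List Char) :
    collapse (a :: b :: r) = if a = b then collapse (b :: r) else a :: collapse (b :: r) := rfl

-- ---- A's compression equals collapse ----

theorem innerA_le (w : List Char) (idx : Nat) (cur : Char) (h : idx ≤ w.length - 1) :
    innerA w idx cur ≤ w.length - 1 := by
  rw [innerA]
  split_ifs with h1 h2
  · exact innerA_le w (idx + 1) cur (by omega)
  · exact h
  · exact h
termination_by w.length - 1 - idx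
decreasing_by omega

theorem innerA_getD (w : List Char) (idx : Nat) (cur : Char) (h : w.getD idx ' ' = cur) :
    w.getD (innerA w idx cur) ' ' = cur := by
  rw [innerA]
  split_ifs with h1 h2
  · exact innerA_getD w (idx + 1) cur h2
  · exact h
  · exact h
termination_by w.length - 1 - idx
decreasing_by omega

theorem innerA_exit (w : List Char) (idx : Nat) (cur : Char) (h : idx ≤ w.length - 1) :
    innerA w idx cur = w.length - 1 ∨ w.getD (innerA w idx cur + 1) ' ' ≠ cur := by
  rw [innerA]
  split_ifs with h1 h2
  · exact innerA_exit w (idx + 1) cur (by omega)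
  · exact Or.inr h2
  · exact Or.inl (by omega)
termination_by w.length - 1 - idx
decreasing_by omega

theorem innerA_collapse (w : List Char) (idx : Nat) (cur : Char)
    (hc : w.getD idx ' ' = cur) (hidx : idx < w.length) :
    collapse (w.drop idx) = collapse (w.drop (innerA w idx cur)) := by
  rw [innerA]
  split_ifs with h1 h2
  · have e2 : w.drop (idx + 1) = cur :: w.drop (idx + 2) := by
      rw [drop_getD w (idx + 1) (by omega), h2]
    have e1 : w.drop idx = cur :: w.drop (idx + 1) := by
      rw [drop_getD w idx hidx, hc]
    rw [e1, e2, collapse_cons₂, if_pos rfl, ← e2]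
    exact innerA_collapse w (idx + 1) cur h2 (by omega)
  · rfl
  · rfl
termination_by w.length - 1 - idx
decreasing_by omega

theorem outerA_spec (w : List Char) (idx : Nat) (char : List Char) (cur : Char)
    (h2 : 2 ≤ w.length) (h : idx < w.length - 1) :
    (let t := outerA w idx char cur
     if t.2.1 = w.length - 1 then
       if t.2.2 ≠ w.getD t.2.1 ' ' then t.1 ++ [w.getD t.2.1 ' '] else t.1
     else t.1) = char ++ collapse (w.drop idx) := by
  rw [outerA, dif_pos h]
  have hge := innerA_ge w idx (w.getD idx ' ')
  have hle := innerA_le w idx (w.getD idx ' ') (by omega)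
  have hcur : w.getD (innerA w idx (w.getD idx ' ')) ' ' = w.getD idx ' ' :=
    innerA_getD w idx (w.getD idx ' ') rfl
  have hcol : collapse (w.drop idx) = collapse (w.drop (innerA w idx (w.getD idx ' '))) :=
    innerA_collapse w idx (w.getD idx ' ') rfl (by omega)
  set c2 := w.getD idx ' ' with hc2
  set j := innerA w idx c2 with hjdef
  by_cases hj1 : j = w.length - 1
  · rw [outerA, dif_neg (by omega)]
    have hne1 : ¬(j + 1 = w.length - 1) := by omega
    simp only [hne1, if_false]
    rw [hcol]
    have e1 : w.drop j = c2 :: w.drop (j + 1) := by rw [drop_getD w j (by omega), hcur]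
    have e2 : w.drop (j + 1) = [] := List.drop_eq_nil_of_le (by omega)
    rw [e1, e2]
    rfl
  · have hjlt : j < w.length - 1 := lt_of_le_of_ne hle hj1
    have hne : w.getD (j + 1) ' ' ≠ c2 := by
      rcases innerA_exit w idx c2 (by omega) with h' | h'
      · exact absurd h' hj1
      · exact h'
    have e1 : w.drop j = c2 :: w.drop (j + 1) := by rw [drop_getD w j (by omega), hcur]
    have e2 : w.drop (j + 1) = w.getD (j + 1) ' ' :: w.drop (j + 2) :=
      drop_getD w (j + 1) (by omega)
    have hstep : collapse (w.drop j) = c2 :: collapse (w.drop (j + 1)) := by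
      rw [e1, e2, collapse_cons₂, if_neg (fun hEq => hne hEq.symm), ← e2]
    by_cases hj2 : j + 1 < w.length - 1
    · have IH := outerA_spec w (j + 1) (char ++ [c2]) c2 h2 hj2
      rw [IH, hcol, hstep, List.append_assoc]
      rfl
    · have hj3 : j + 1 = w.length - 1 := by omega
      rw [outerA, dif_neg (by omega)]
      simp only [hj3, if_true, ne_eq]
      have hcond : ¬(c2 = w.getD (w.length - 1) ' ') := by
        rw [← hj3]; exact fun hEq => hne hEq.symm
      simp only [hcond, not_false_iff, if_true]
      rw [hcol, hstep]
      have e3 : w.drop (j + 1) = [w.getD (j + 1) ' '] := by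
        rw [e2]
        have : w.drop (j + 2) = [] := List.drop_eq_nil_of_le (by omega)
        rw [this]
      rw [e3, hj3]
      simp [collapse, List.append_assoc]
termination_by w.length - idx
decreasing_by have := innerA_ge w idx (w.getD idx ' '); omega

theorem compressA_eq_collapse (w : List Char) (h2 : 2 ≤ w.length) :
    compressA w = collapse w := by
  have h := outerA_spec w 0 [] ' ' h2 (by omega)
  simpa [compressA] using h

-- ---- B's compression equals collapse ----

theorem compB_eq_collapse (w : List Char) : compB w = collapse w := by
  match w with
  | [] => rfl
  | [c] => rfl
  | a :: b :: r =>
    have ih := compB_eq_collapse (b :: r)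
    have lhs : compB (a :: b :: r) = a :: List.filterMap fB ((a, b) :: (b :: r).zip r) := rfl
    have lhs' : compB (b :: r) = b :: List.filterMap fB ((b :: r).zip r) := rfl
    rw [lhs, List.filterMap_cons, collapse_cons₂]
    by_cases hab : a = b
    · subst hab
      have : fB (a, a) = none := by simp [fB]
      rw [this, if_pos rfl, ← ih, lhs']
    · have : fB (a, b) = some b := by simp [fB, hab]
      rw [this, if_neg hab, ← ih, lhs']
termination_by w.length

-- ---- the bitmask selection enumerates exactly the sublists ----

theorem selectB_eq_selRec (comp : List Char) (m : Nat) : selectB comp m = selRec comp m := by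
  induction comp generalizing m with
  | nil => rfl
  | cons c r ih =>
      show (List.range (r.length + 1)).filterMap _ = _
      rw [List.range_succ_eq_map, List.filterMap_cons, List.filterMap_map]
      have hfun : ((fun i => if (m >>> i) &&& 1 = 1 then some ((c :: r).getD i ' ') else none) ∘
          Nat.succ) =
          (fun i => if ((m >>> 1) >>> i) &&& 1 = 1 then some (r.getD i ' ') else none) := by
        funext i
        simp only [Function.comp_apply, Nat.succ_eq_add_one, List.getD_cons_succ]
        rw [show i + 1 = 1 + i by omega, Nat.shiftRight_add]
      rw [hfun]
      have ih' : List.filterMap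
          (fun i => if ((m >>> 1) >>> i) &&& 1 = 1 then some (r.getD i ' ') else none)
          (List.range r.length) = selRec r (m >>> 1) := ih (m >>> 1)
      by_cases hbit : m % 2 = 1
      · simp [selRec, Nat.and_one_is_mod, hbit]
        simpa using ih'
      · simp [selRec, Nat.and_one_is_mod, hbit]
        simpa using ih'

theorem selRec_sublist (comp : List Char) (m : Nat) : List.Sublist (selRec comp m) comp := by
  induction comp generalizing m with
  | nil => exact List.Sublist.refl []
  | cons c r ih =>
      rw [selRec]
      by_cases hbit : m &&& 1 = 1
      · simp only [hbit, if_true, List.singleton_append]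
        exact List.Sublist.cons₂ c (ih (m >>> 1))
      · simp only [hbit, if_false, List.nil_append]
        exact List.Sublist.cons c (ih (m >>> 1))

theorem selRec_surj (comp t : List Char) (h : List.Sublist t comp) :
    ∃ m, m < 1 <<< comp.length ∧ selRec comp m = t := by
  induction h with
  | slnil => exact ⟨0, by simp, rfl⟩
  | @cons l₁ l₂ a h ih =>
      obtain ⟨m, hm, hsel⟩ := ih
      refine ⟨2 * m, ?_, ?_⟩
      · rw [Nat.one_shiftLeft] at hm ⊢
        have := Nat.pow_succ 2 l₂.length
        simp only [List.length_cons]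
        omega
      · have hb : (2 * m) &&& 1 = 0 := by rw [Nat.and_one_is_mod]; omega
        have hs : (2 * m) >>> 1 = m := by rw [Nat.shiftRight_one]; omega
        rw [selRec, hb, hs, hsel]
        simp
  | @cons₂ l₁ l₂ a h ih =>
      obtain ⟨m, hm, hsel⟩ := ih
      refine ⟨2 * m + 1, ?_, ?_⟩
      · rw [Nat.one_shiftLeft] at hm ⊢
        have := Nat.pow_succ 2 l₂.length
        simp only [List.length_cons]
        omega
      · have hb : (2 * m + 1) &&& 1 = 1 := by rw [Nat.and_one_is_mod]; omega
        have hs : (2 * m + 1) >>> 1 = m := by rw [Nat.shiftRight_one]; omega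
        rw [selRec, hb, hs, hsel]
        simp

-- ---- len(set(s)) == len(s) is exactly distinctness ----

theorem nodup_append_singleton (l : List Char) (a : Char) :
    (l ++ [a]).Nodup ↔ l.Nodup ∧ a ∉ l := by
  rw [List.nodup_append]
  constructor
  · rintro ⟨h1, _, h3⟩
    exact ⟨h1, fun ha => h3 a ha a (by simp) rfl⟩
  · rintro ⟨h1, h2⟩
    refine ⟨h1, List.nodup_singleton a, ?_⟩
    intro x hx b hb
    rw [List.mem_singleton.mp hb]
    intro hEq
    exact h2 (hEq ▸ hx)

theorem ofList_length_lt (s : List Char) (h : ¬ s.Nodup) :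
    (PySem.Set.ofList s).length < s.length := by
  induction s using List.reverseRecOn with
  | nil => exact absurd List.nodup_nil h
  | append_singleton xs x ih =>
      rw [PySem.Set.ofList_append_singleton]
      by_cases hx : x ∈ xs
      · rw [PySem.Set.add_of_mem ((PySem.Set.mem_ofList xs x).mpr hx)]
        have := PySem.Set.length_ofList_le xs
        simp only [List.length_append, List.length_singleton]
        omega
      · have hnx : x ∉ PySem.Set.ofList xs := fun hmem =>
          hx ((PySem.Set.mem_ofList xs x).mp hmem)
        rw [PySem.Set.add_of_not_mem hnx]
        have hxs : ¬ xs.Nodup := by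
          intro hn
          exact h ((nodup_append_singleton xs x).mpr ⟨hn, hx⟩)
        have := ih hxs
        simp only [List.length_append, List.length_singleton]
        omega

theorem ofList_length_eq_iff (s : List Char) :
    (PySem.Set.ofList s).length = s.length ↔ s.Nodup := by
  constructor
  · intro h
    by_contra hn
    exact absurd h (Nat.ne_of_lt (ofList_length_lt s hn))
  · intro h
    rw [PySem.Set.ofList_eq_self_of_nodup s h]

-- ---- membership and nodup of B's set ----

theorem outB_foldl_mem (comp : List Char) (l : List Nat) (acc : List String) (x : String) :
    (x ∈ l.foldl
        (fun acc mask =>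
          let s := selectB comp mask
          if (PySem.Set.ofList s).length = s.length then PySem.Set.add acc (String.ofList s)
          else acc) acc) ↔
      x ∈ acc ∨ ∃ m ∈ l, (selRec comp m).Nodup ∧ x = String.ofList (selRec comp m) := by
  induction l generalizing acc with
  | nil => simp
  | cons m l ih =>
      rw [List.foldl_cons, ih]
      have hacc : (x ∈
          (let s := selectB comp m
           if (PySem.Set.ofList s).length = s.length then PySem.Set.add acc (String.ofList s)
           else acc)) ↔
          x ∈ acc ∨ ((selRec comp m).Nodup ∧ x = String.ofList (selRec comp m)) := by
        simp only [selectB_eq_selRec, ofList_length_eq_iff]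
        split_ifs with hnd
        · rw [PySem.Set.mem_add]
          tauto
        · tauto
      rw [hacc]
      simp only [List.exists_mem_cons_iff]
      tauto

theorem outB_mem (comp : List Char) (x : String) :
    x ∈ outB comp ↔ ∃ t, List.Sublist t comp ∧ t.Nodup ∧ x = String.ofList t := by
  rw [outB, outB_foldl_mem]
  simp only [PySem.Set.empty, List.not_mem_nil, false_or, List.mem_range]
  constructor
  · rintro ⟨m, _, hnd, rfl⟩
    exact ⟨selRec comp m, selRec_sublist comp m, hnd, rfl⟩
  · rintro ⟨t, hsub, hnd, rfl⟩
    obtain ⟨m, hm, hsel⟩ := selRec_surj comp t hsub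
    exact ⟨m, hm, by rw [hsel]; exact ⟨hnd, rfl⟩⟩

theorem outB_nodup (comp : List Char) : (outB comp).Nodup := by
  rw [outB]
  have : ∀ (l : List Nat) (acc : List String), acc.Nodup →
      (l.foldl
        (fun acc mask =>
          let s := selectB comp mask
          if (PySem.Set.ofList s).length = s.length then PySem.Set.add acc (String.ofList s)
          else acc) acc).Nodup := by
    intro l
    induction l with
    | nil => exact fun acc h => h
    | cons m l ih =>
        intro acc hacc
        rw [List.foldl_cons]
        apply ih
        dsimp only
        split_ifs with hnd
        · exact PySem.Set.nodup_add _ _ hacc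
        · exact hacc
  exact this _ _ (by simp [PySem.Set.empty])

-- ---- membership and nodup of A's result ----

mutual
theorem solveA_mem (s : List Char) (result : List String) (tmp : List Char) (x : String) :
    x ∈ solveA s result tmp ↔
      x ∈ result ∨ ∃ t, List.Sublist t s ∧ t.Nodup ∧ (∀ c ∈ t, c ∉ tmp) ∧
        x = String.ofList (tmp ++ t) := by
  rw [solveA, solveFor_mem]
  have hres : (x ∈ (if String.ofList tmp ∈ result then result
        else result ++ [String.ofList tmp])) ↔
      x ∈ result ∨ x = String.ofList tmp := by
    split_ifs with hm
    · constructor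
      · exact Or.inl
      · rintro (h | rfl)
        · exact h
        · exact hm
    · simp [List.mem_append]
  rw [hres]
  constructor
  · rintro ((h | rfl) | ⟨t, _, hsub, hnd, hav, rfl⟩)
    · exact Or.inl h
    · exact Or.inr ⟨[], List.nil_sublist _, List.nodup_nil, by simp, by simp⟩
    · exact Or.inr ⟨t, hsub, hnd, hav, rfl⟩
  · rintro (h | ⟨t, hsub, hnd, hav, rfl⟩)
    · exact Or.inl (Or.inl h)
    · by_cases ht : t = []
      · subst ht
        exact Or.inl (Or.inr (by simp))
      · exact Or.inr ⟨t, ht, hsub, hnd, hav, rfl⟩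
termination_by (s.length, 1)

theorem solveFor_mem (s : List Char) (result : List String) (tmp : List Char) (x : String) :
    x ∈ solveFor s result tmp ↔
      x ∈ result ∨ ∃ t, t ≠ [] ∧ List.Sublist t s ∧ t.Nodup ∧ (∀ c ∈ t, c ∉ tmp) ∧
        x = String.ofList (tmp ++ t) := by
  match s with
  | [] =>
      rw [solveFor]
      constructor
      · exact Or.inl
      · rintro (h | ⟨t, hne, hsub, _⟩)
        · exact h
        · exact absurd (List.sublist_nil.mp hsub) hne
  | c :: rest =>
      rw [solveFor, solveFor_mem rest]
      have hres : (x ∈ (if c ∈ tmp then result else solveA rest result (tmp ++ [c]))) ↔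
          x ∈ result ∨ (c ∉ tmp ∧ ∃ t, List.Sublist t rest ∧ t.Nodup ∧
            (∀ d ∈ t, d ∉ tmp ++ [c]) ∧ x = String.ofList (tmp ++ [c] ++ t)) := by
        split_ifs with hc
        · constructor
          · exact Or.inl
          · rintro (h | ⟨hcn, _⟩)
            · exact h
            · exact absurd hc hcn
        · rw [solveA_mem rest]
          constructor
          · rintro (h | ⟨t, hsub, hnd, hav, rfl⟩)
            · exact Or.inl h
            · exact Or.inr ⟨hc, t, hsub, hnd, hav, rfl⟩
          · rintro (h | ⟨_, t, hsub, hnd, hav, rfl⟩)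
            · exact Or.inl h
            · exact Or.inr ⟨t, hsub, hnd, hav, rfl⟩
      rw [hres]
      constructor
      · rintro ((h | ⟨hcn, t, hsub, hnd, hav, rfl⟩) | ⟨t, hne, hsub, hnd, hav, rfl⟩)
        · exact Or.inl h
        · refine Or.inr ⟨c :: t, by simp, List.Sublist.cons₂ c hsub, ?_, ?_, ?_⟩
          · rw [List.nodup_cons]
            refine ⟨fun hct => ?_, hnd⟩
            exact hav c hct (by simp)
          · intro d hd
            rcases List.mem_cons.mp hd with rfl | hd'
            · exact hcn
            · intro hdt
              exact hav d hd' (List.mem_append_left [c] hdt)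
          · rw [List.append_assoc]
            rfl
        · exact Or.inr ⟨t, hne, List.Sublist.cons c hsub, hnd, hav, rfl⟩
      · rintro (h | ⟨t, hne, hsub, hnd, hav, rfl⟩)
        · exact Or.inl (Or.inl h)
        · rcases List.sublist_cons_iff.mp hsub with hsub' | ⟨t', rfl, hsub'⟩
          · exact Or.inr ⟨t, hne, hsub', hnd, hav, rfl⟩
          · have hcn : c ∉ tmp := hav c (by simp)
            have hct' : c ∉ t' := (List.nodup_cons.mp hnd).1
            have hnd' : t'.Nodup := (List.nodup_cons.mp hnd).2
            refine Or.inl (Or.inr ⟨hcn, t', hsub', hnd', ?_, ?_⟩)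
            · intro d hd hmem
              rcases List.mem_append.mp hmem with h1 | h1
              · exact hav d (List.mem_cons_of_mem c hd) h1
              · rw [List.mem_singleton.mp h1] at hd
                exact hct' hd
            · rw [List.append_assoc]
              rfl
termination_by (s.length, 0)
end

mutual
theorem solveA_nodup (s : List Char) (result : List String) (tmp : List Char)
    (h : result.Nodup) : (solveA s result tmp).Nodup := by
  rw [solveA]
  apply solveFor_nodup
  split_ifs with hm
  · exact h
  · exact List.Nodup.append h (List.nodup_singleton _)
      (by simp only [List.disjoint_singleton]; exact hm)
termination_by (s.length, 1)

theorem solveFor_nodup (s : List Char) (result : List String) (tmp : List Char)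
    (h : result.Nodup) : (solveFor s result tmp).Nodup := by
  match s with
  | [] => rw [solveFor]; exact h
  | c :: rest =>
      rw [solveFor]
      apply solveFor_nodup
      split_ifs with hc
      · exact h
      · exact solveA_nodup rest result (tmp ++ [c]) h
termination_by (s.length, 0)
end

theorem topLoopA_eq_solveFor (s : List Char) (r : List String) :
    topLoopA s r = solveFor s r [] := by
  induction s generalizing r with
  | nil => rw [topLoopA, solveFor]
  | cons c rest ih =>
      rw [topLoopA, solveFor]
      simp only [List.not_mem_nil, if_false, List.nil_append]
      exact ih (solveA rest r [c])

theorem topLoopA_mem (comp : List Char) (x : String) :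
    x ∈ topLoopA comp [""] ↔ ∃ t, List.Sublist t comp ∧ t.Nodup ∧ x = String.ofList t := by
  rw [topLoopA_eq_solveFor, solveFor_mem]
  simp only [List.mem_singleton]
  constructor
  · rintro (rfl | ⟨t, _, hsub, hnd, _, rfl⟩)
    · exact ⟨[], List.nil_sublist _, List.nodup_nil, rfl⟩
    · exact ⟨t, hsub, hnd, rfl⟩
  · rintro ⟨t, hsub, hnd, rfl⟩
    by_cases ht : t = []
    · subst ht
      exact Or.inl rfl
    · exact Or.inr ⟨t, ht, hsub, hnd, by simp, rfl⟩

theorem topLoopA_nodup (comp : List Char) : (topLoopA comp [""]).Nodup := by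
  rw [topLoopA_eq_solveFor]
  exact solveFor_nodup comp [""] [] (by simp)

-- ---- both enumerate the same set, so the sorts agree ----

theorem sorted_eq (comp : List Char) :
    PySem.List.sorted (topLoopA comp [""]) (fun x => x) false =
      PySem.List.sorted (outB comp) (fun x => x) false := by
  apply PySem.List.sorted_eq_sorted_of_perm _ _ (fun x => x) (fun _ _ h => h)
  rw [List.perm_ext_iff_of_nodup (topLoopA_nodup comp) (outB_nodup comp)]
  intro x
  rw [topLoopA_mem, outB_mem]

-- ===== VERDICT (by name: the statement is the Claim_ definition above) =====
theorem good_subsequences_spec : Claim_equal_good_subsequences := by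
  intro word _
  unfold Spec_good_subsequences good_subsequences good_subsequences_alt
  by_cases h0 : word.toList.length = 0
  · have hw : word.toList = [] := List.length_eq_zero_iff.mp h0
    rw [if_pos h0, hw]
    rfl
  · by_cases h1 : word.toList.length = 1
    · obtain ⟨c, hc⟩ := List.length_eq_one_iff.mp h1
      have hword : word = String.ofList [c] := by rw [← hc, String.ofList_toList]
      rw [if_neg h0, if_pos h1, hc, hword]
      have hcompB : compB [c] = [c] := rfl
      rw [hcompB]
      symm
      apply PySem.List.sorted_eq_of_perm_of_pairwise_lt _ _ (fun x => x)
      · have hne : ("" : String) ≠ String.ofList [c] := by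
          intro h
          have := congrArg String.toList h
          simp [String.toList_ofList] at this
        rw [List.perm_ext_iff_of_nodup (by simp [hne]) (outB_nodup [c])]
        intro x
        rw [outB_mem]
        simp only [List.mem_cons, List.not_mem_nil, or_false]
        constructor
        · rintro (rfl | rfl)
          · exact ⟨[], List.nil_sublist _, List.nodup_nil, rfl⟩
          · exact ⟨[c], List.Sublist.refl _, by simp, rfl⟩
        · rintro ⟨t, hsub, _, rfl⟩
          rcases List.sublist_singleton.mp hsub with rfl | rfl
          · simp
          · simp
      · refine List.pairwise_cons.mpr ⟨?_, List.pairwise_singleton _ _⟩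
        intro y hy
        rw [List.mem_singleton.mp hy, String.lt_iff_toList_lt]
        simp only [String.toList_ofList]
        exact List.nil_lt_cons c []
    · rw [if_neg h0, if_neg h1, compB_eq_collapse,
        ← compressA_eq_collapse word.toList (by omega)]
      exact sorted_eq (compressA word.toList)
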